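-- pv_equiv track=rewrite | github.com/aleskucera/ALVE-3D | src/old/utils_2.py | crop_sequence_format
-- ===== SOURCE A (Python) =====
-- def crop_sequence_format(data: list, size: int) -> list:
--     """Crop the data to the specified size so that sum(N_i for i = 1, ... , S) = size, where
--     N_i is the number of samples in the i-th sequence and S is the number of sequences.
--
--     :param data: The data to crop with shape (S, N_i, ...), where
--                  S is number of sequences and N number of samples in the i-th sequence
--     :param size: The size to crop the data to
--     :return: The cropped data
--     """
--
--     # Compute the sequence index where the size is located
--     seq_idx = 0
--     seq_size = len(data[seq_idx])
--     while seq_size < size: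
--         seq_idx += 1
--         seq_size += len(data[seq_idx])
--
--     # Compute the sample index where to crop the sequence
--     sample_idx = size - seq_size + len(data[seq_idx])
--
--     # Crop the data
--     cropped_data = data[:seq_idx]
--     cropped_data.append(data[seq_idx][:sample_idx])
--
--     return cropped_data
-- ===== SOURCE B (Python) =====
-- def crop_sequence_format(data: list, size: int) -> list:
--     """Crop data (list of sequences) so the total sample count equals size.
--
--     Two stages: build the prefix-sum table of sequence lengths, then binary-search
--     it for the first sequence whose cumulative count reaches size, and slice there.
--     """
--     cum = []
--     total = 0
--     for seq in data:
--         total += len(seq)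
--         cum.append(total)
--     lo, hi = 0, len(cum)
--     while lo < hi:
--         mid = (lo + hi) // 2
--         if cum[mid] < size:
--             lo = mid + 1
--         else:
--             hi = mid
--     prev = cum[lo - 1] if lo > 0 else 0
--     return data[:lo] + [data[lo][:size - prev]]
-- ===== Notes on version B (the rewrite author's own statement) =====
-- stated objective: alternative
-- what changed: B replaces A's linear scan-with-running-sum by two stages: it first materialises the prefix-sum table of sequence lengths, then binary-searches that table for the first cumulative count reaching size and slices there.
import Mathlib
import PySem

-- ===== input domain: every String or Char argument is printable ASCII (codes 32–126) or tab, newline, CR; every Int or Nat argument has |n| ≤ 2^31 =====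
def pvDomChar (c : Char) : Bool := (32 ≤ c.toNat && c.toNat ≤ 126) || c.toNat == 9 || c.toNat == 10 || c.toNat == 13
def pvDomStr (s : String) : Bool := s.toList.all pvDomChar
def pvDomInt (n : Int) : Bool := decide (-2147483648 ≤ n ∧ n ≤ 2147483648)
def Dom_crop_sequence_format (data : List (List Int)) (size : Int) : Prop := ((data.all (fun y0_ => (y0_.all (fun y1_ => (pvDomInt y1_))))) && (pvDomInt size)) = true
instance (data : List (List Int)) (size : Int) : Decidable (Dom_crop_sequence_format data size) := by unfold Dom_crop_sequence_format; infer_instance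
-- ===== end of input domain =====

-- B is a different algorithm of the same linear cost: it builds the prefix-sum table of
-- sequence lengths and binary-searches it, instead of A's scan with a running sum.
-- Proved equal on Pre_ (the inputs where A returns; elsewhere both Pythons raise IndexError).

-- ===== PORT A =====
-- A's while-loop: advance seq_idx, accumulating seq_size, while seq_size < size.
-- When Python would evaluate data[seq_idx+1] out of range it raises IndexError (outside Pre_);
-- the port returns the current state there.
def cropA_loop (data : List (List Int)) (size : Int) (seq_idx : Nat) (seq_size : Int) : Nat × Int :=
  if seq_size < size then
    if h : seq_idx + 1 < data.length then
      cropA_loop data size (seq_idx + 1) (seq_size + (data[seq_idx + 1].length : Int))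
    else (seq_idx, seq_size)  -- Python: IndexError (outside Pre_)
  else (seq_idx, seq_size)
termination_by data.length - seq_idx

def crop_sequence_format (data : List (List Int)) (size : Int) : List (List Int) :=
  match data with
  | [] => []  -- Python: len(data[0]) raises IndexError (outside Pre_)
  | first :: _ =>
    let st := cropA_loop data size 0 (first.length : Int)
    let row := data[st.1]?.getD []
    let sample_idx := size - st.2 + (row.length : Int)
    data.take st.1 ++ [PySem.List.slice row none (some sample_idx)]

-- ===== PORT B =====
-- Source B's first loop: total += len(seq); cum.append(total)
def cumList (data : List (List Int)) : List Int :=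
  (data.foldl (fun (st : Int × List Int) seq =>
     (st.1 + (seq.length : Int), st.2 ++ [st.1 + (seq.length : Int)])) (0, [])).2

-- Source B's while-loop: binary search for the first index with cum[idx] >= size.
-- cum[mid] is always in range here (lo < hi ≤ len cum), so getD 0 is exact.
def bsearchB (cum : List Int) (size : Int) (lo hi : Nat) : Nat :=
  if h : lo < hi then
    let mid := (lo + hi) / 2
    if (cum[mid]?.getD 0) < size then bsearchB cum size (mid + 1) hi
    else bsearchB cum size lo mid
  else lo
termination_by hi - lo
decreasing_by all_goals omega

def crop_sequence_format_alt (data : List (List Int)) (size : Int) : List (List Int) :=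
  let cum := cumList data
  let lo := bsearchB cum size 0 cum.length
  let prev := if lo > 0 then cum[lo - 1]?.getD 0 else 0
  -- Python: data[lo] raises IndexError when lo = len data (outside Pre_)
  data.take lo ++ [PySem.List.slice (data[lo]?.getD []) none (some (size - prev))]

-- ===== PRECONDITION & SPEC =====
-- Pre_ is exactly the inputs where Python A returns: data nonempty and size no larger than the
-- total number of samples (otherwise A's scan runs off the end and raises IndexError; B raises too).
def Pre_crop_sequence_format (data : List (List Int)) (size : Int) : Prop :=
  data ≠ [] ∧ size ≤ (data.map (fun r => (r.length : Int))).sum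
instance (data : List (List Int)) (size : Int) : Decidable (Pre_crop_sequence_format data size) := by unfold Pre_crop_sequence_format; infer_instance

def pvWitness_crop_sequence_format : List (List Int) × Int := ([[1, 2], [3, 4, 5]], 4)

def Spec_crop_sequence_format (data : List (List Int)) (size : Int) (out : List (List Int)) : Prop := out = crop_sequence_format_alt data size
instance (data : List (List Int)) (size : Int) (out : List (List Int)) : Decidable (Spec_crop_sequence_format data size out) := by unfold Spec_crop_sequence_format; infer_instance

-- ===== CLAIM (what is proved, stated in full; the proofs are below) =====
def Claim_equal_crop_sequence_format : Prop := ∀ (data : List (List Int)) (size : Int), Dom_crop_sequence_format data size → Pre_crop_sequence_format data size → Spec_crop_sequence_format data size (crop_sequence_format data size)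

-- ===== LEMMAS AND PROOFS =====

-- sum of the lengths of the first i rows (as Int)
def pvPre (data : List (List Int)) (i : Nat) : Int :=
  ((data.take i).map (fun r => (r.length : Int))).sum

lemma pvPre_succ (data : List (List Int)) (i : Nat) (h : i < data.length) :
    pvPre data (i + 1) = pvPre data i + (data[i].length : Int) := by
  unfold pvPre
  rw [List.map_take, List.map_take, List.sum_take_succ _ i (by simpa using h)]
  simp

lemma pvPre_full (data : List (List Int)) (i : Nat) (h : data.length ≤ i) :
    pvPre data i = (data.map (fun r => (r.length : Int))).sum := by
  unfold pvPre
  rw [List.take_of_length_le h]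

lemma pvPre_step_le (data : List (List Int)) (i : Nat) :
    pvPre data i ≤ pvPre data (i + 1) := by
  by_cases h : i < data.length
  · rw [pvPre_succ data i h]
    have h0 : (0 : Int) ≤ (data[i].length : Int) := Int.natCast_nonneg _
    omega
  · unfold pvPre
    rw [List.take_of_length_le (by omega), List.take_of_length_le (by omega)]

lemma pvPre_mono (data : List (List Int)) {i j : Nat} (h : i ≤ j) :
    pvPre data i ≤ pvPre data j := by
  induction j with
  | zero => simp_all
  | succ j ih =>
    rcases Nat.lt_or_ge i (j + 1) with hlt | hge
    · exact le_trans (ih (by omega)) (pvPre_step_le data j)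
    · have : i = j + 1 := by omega
      simp [this]

-- scan characterisation of Source B's first loop
def pvScan (data : List (List Int)) (t : Int) : List Int :=
  match data with
  | [] => []
  | seq :: rest => (t + (seq.length : Int)) :: pvScan rest (t + (seq.length : Int))

lemma foldl_cum (data : List (List Int)) (t : Int) (acc : List Int) :
    (data.foldl (fun (st : Int × List Int) seq =>
       (st.1 + (seq.length : Int), st.2 ++ [st.1 + (seq.length : Int)])) (t, acc)).2
      = acc ++ pvScan data t := by
  induction data generalizing t acc with
  | nil => simp [pvScan]
  | cons seq rest ih => simp [pvScan, ih]

lemma pvScan_length (data : List (List Int)) (t : Int) :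
    (pvScan data t).length = data.length := by
  induction data generalizing t with
  | nil => rfl
  | cons seq rest ih => simp [pvScan, ih]

lemma pvScan_get (data : List (List Int)) (t : Int) :
    ∀ i, i < data.length → (pvScan data t)[i]?.getD 0 = t + pvPre data (i + 1) := by
  induction data generalizing t with
  | nil => intro i hi; simp at hi
  | cons seq rest ih =>
    intro i hi
    cases i with
    | zero => simp [pvScan, pvPre]
    | succ i =>
      have := ih (t + (seq.length : Int)) i (by simpa using hi)
      simp only [pvScan, List.getElem?_cons_succ]
      rw [this]
      have : pvPre (seq :: rest) (i + 1 + 1) = (seq.length : Int) + pvPre rest (i + 1) := by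
        simp [pvPre, List.take_succ_cons]
      rw [this]; ring

lemma cumList_length (data : List (List Int)) : (cumList data).length = data.length := by
  unfold cumList
  rw [foldl_cum]
  simp [pvScan_length]

lemma cumList_get (data : List (List Int)) (i : Nat) (hi : i < data.length) :
    (cumList data)[i]?.getD 0 = pvPre data (i + 1) := by
  unfold cumList
  rw [foldl_cum]
  simpa using pvScan_get data 0 i hi

-- A's loop reaches the least index whose cumulative count is ≥ size
lemma cropA_char (data : List (List Int)) (size : Int)
    (hsize : size ≤ (data.map (fun r => (r.length : Int))).sum) :
    ∀ n i, i < data.length → data.length - i ≤ n →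
      (∀ t, t < i → pvPre data (t + 1) < size) →
      (cropA_loop data size i (pvPre data (i + 1))).1 < data.length ∧
      (cropA_loop data size i (pvPre data (i + 1))).2
        = pvPre data ((cropA_loop data size i (pvPre data (i + 1))).1 + 1) ∧
      ¬ pvPre data ((cropA_loop data size i (pvPre data (i + 1))).1 + 1) < size ∧
      (∀ t, t < (cropA_loop data size i (pvPre data (i + 1))).1 → pvPre data (t + 1) < size) := by
  intro n
  induction n with
  | zero => intro i hi hn; omega
  | succ n ih =>
    intro i hi hn hinv
    by_cases hc : pvPre data (i + 1) < size
    · have hlt : i + 1 < data.length := by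
        by_contra hge
        have := pvPre_full data (i + 1) (by omega)
        omega
      have hstep : cropA_loop data size i (pvPre data (i + 1))
          = cropA_loop data size (i + 1) (pvPre data (i + 1 + 1)) := by
        rw [cropA_loop, if_pos hc, dif_pos hlt, pvPre_succ data (i + 1) hlt]
      rw [hstep]
      exact ih (i + 1) hlt (by omega)
        (by intro t ht; rcases Nat.lt_or_ge t i with h | h
            · exact hinv t h
            · have : t = i := by omega
              subst this; exact hc)
    · have hret : cropA_loop data size i (pvPre data (i + 1)) = (i, pvPre data (i + 1)) := by
        rw [cropA_loop, if_neg hc]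
      rw [hret]
      exact ⟨hi, rfl, hc, hinv⟩

-- the binary search returns the (unique) least index k with cum[k] ≥ size
lemma bsearch_eq (cum : List Int) (size : Int) (k : Nat)
    (hmono : ∀ a b : Nat, a ≤ b → b < cum.length → cum[a]?.getD 0 ≤ cum[b]?.getD 0)
    (hk : k < cum.length) (hge : ¬ cum[k]?.getD 0 < size)
    (hlt : ∀ t, t < k → cum[t]?.getD 0 < size) :
    ∀ n lo hi, hi ≤ cum.length → lo ≤ k → k ≤ hi → hi - lo ≤ n →
      bsearchB cum size lo hi = k := by
  intro n
  induction n with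
  | zero =>
    intro lo hi _ hlok hkhi hn
    rw [bsearchB, dif_neg (by omega)]
    omega
  | succ n ih =>
    intro lo hi hhi hlok hkhi hn
    by_cases h : lo < hi
    · rw [bsearchB, dif_pos h]
      simp only
      by_cases hc : cum[(lo + hi) / 2]?.getD 0 < size
      · rw [if_pos hc]
        have hmidk : (lo + hi) / 2 < k := by
          by_contra hge'
          have := hmono k ((lo + hi) / 2) (by omega) (by omega)
          omega
        exact ih ((lo + hi) / 2 + 1) hi hhi (by omega) hkhi (by omega)
      · rw [if_neg hc]
        have hkmid : k ≤ (lo + hi) / 2 := by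
          by_contra hgt
          exact hc (hlt _ (by omega))
        exact ih lo ((lo + hi) / 2) (by omega) hlok hkmid (by omega)
    · rw [bsearchB, dif_neg h]
      omega

-- ===== VERDICT (by name: the statement is the Claim_ definition above) =====
theorem crop_sequence_format_spec : Claim_equal_crop_sequence_format := by
  unfold Claim_equal_crop_sequence_format
  intro data size _ hpre
  obtain ⟨hne, hsize⟩ := hpre
  unfold Spec_crop_sequence_format
  cases data with
  | nil => exact absurd rfl hne
  | cons first rest =>
    have hdlen : 0 < (first :: rest).length := by simp
    have hp1 : pvPre (first :: rest) 1 = (first.length : Int) := by simp [pvPre]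
    have hchar := cropA_char (first :: rest) size hsize (first :: rest).length 0 hdlen (by omega) (by omega)
    rw [hp1] at hchar
    obtain ⟨hjlt, hs2, hjge, hjlt'⟩ := hchar
    have hclen : (cumList (first :: rest)).length = (first :: rest).length :=
      cumList_length (first :: rest)
    have hmono : ∀ a b : Nat, a ≤ b → b < (cumList (first :: rest)).length →
        (cumList (first :: rest))[a]?.getD 0 ≤ (cumList (first :: rest))[b]?.getD 0 := by
      intro a b hab hb
      rw [cumList_get (first :: rest) a (by omega), cumList_get (first :: rest) b (by omega)]
      exact pvPre_mono (first :: rest) (by omega)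
    have hbs : bsearchB (cumList (first :: rest)) size 0 (cumList (first :: rest)).length
        = (cropA_loop (first :: rest) size 0 (first.length : Int)).1 := by
      apply bsearch_eq (cumList (first :: rest)) size _ hmono (by omega)
        (by rw [cumList_get (first :: rest) _ hjlt]; exact hjge)
        (by intro t ht; rw [cumList_get (first :: rest) t (by omega)]; exact hjlt' t ht)
        (cumList (first :: rest)).length 0 (cumList (first :: rest)).length le_rfl
        (by omega) (by omega) (by omega)
    have hprev : (if (cropA_loop (first :: rest) size 0 (first.length : Int)).1 > 0 then
          (cumList (first :: rest))[(cropA_loop (first :: rest) size 0 (first.length : Int)).1 - 1]?.getD 0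
        else 0) = pvPre (first :: rest) (cropA_loop (first :: rest) size 0 (first.length : Int)).1 := by
      by_cases h0 : (cropA_loop (first :: rest) size 0 (first.length : Int)).1 > 0
      · rw [if_pos h0, cumList_get (first :: rest) _ (by omega)]
        congr 1
        omega
      · rw [if_neg h0]
        have h00 : (cropA_loop (first :: rest) size 0 (first.length : Int)).1 = 0 := by omega
        rw [h00]
        simp [pvPre]
    have hrow : (first :: rest)[(cropA_loop (first :: rest) size 0 (first.length : Int)).1]?.getD []
        = (first :: rest)[(cropA_loop (first :: rest) size 0 (first.length : Int)).1]'hjlt := by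
      rw [List.getElem?_eq_getElem hjlt]
      rfl
    simp only [crop_sequence_format, crop_sequence_format_alt, hbs, hprev, hrow]
    have harith : size - (cropA_loop (first :: rest) size 0 (first.length : Int)).2
        + (((first :: rest)[(cropA_loop (first :: rest) size 0 (first.length : Int)).1]'hjlt).length : Int)
        = size - pvPre (first :: rest) (cropA_loop (first :: rest) size 0 (first.length : Int)).1 := by
      rw [hs2, pvPre_succ (first :: rest) _ hjlt]
      ring
    rw [harith]
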